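-- pv_equiv track=rewrite | github.com/RupanugaPM/Chess-app | Chess.py | rotate_matrix_index
-- ===== SOURCE A (Python) =====
-- def rotate_matrix_index(i, j, rows, cols, times):
--     """
--     Rotate the point (i, j) in a rows×cols matrix by 90° CW 'times' times.
--     Uses an inner helper to do one 90° turn.
--     Returns (final_i, final_j, final_rows, final_cols).
--     """
--     def rotate90(pi, pj, pr, pc):
--         # one 90° clockwise step
--         return pj, pr - 1 - pi, pc, pr
--
--     r = times % 4
--     ci, cj, cr, cc = i, j, rows, cols
--     for _ in range(r):
--         ci, cj, cr, cc = rotate90(ci, cj, cr, cc)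
--     return ci, cj
-- ===== SOURCE B (Python) =====
-- def rotate_matrix_index(i, j, rows, cols, times):
--     r = times % 4
--     if r == 0:
--         return (i, j)
--     elif r == 1:
--         return (j, rows - 1 - i)
--     elif r == 2:
--         return (rows - 1 - i, cols - 1 - j)
--     else:
--         return (cols - 1 - j, i)
-- ===== Notes on version B (the rewrite author's own statement) =====
-- stated objective: simpler
-- what changed: Replaced the iterative single-step rotation loop by a direct 4-case closed form keyed on times % 4.
import Mathlib
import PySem

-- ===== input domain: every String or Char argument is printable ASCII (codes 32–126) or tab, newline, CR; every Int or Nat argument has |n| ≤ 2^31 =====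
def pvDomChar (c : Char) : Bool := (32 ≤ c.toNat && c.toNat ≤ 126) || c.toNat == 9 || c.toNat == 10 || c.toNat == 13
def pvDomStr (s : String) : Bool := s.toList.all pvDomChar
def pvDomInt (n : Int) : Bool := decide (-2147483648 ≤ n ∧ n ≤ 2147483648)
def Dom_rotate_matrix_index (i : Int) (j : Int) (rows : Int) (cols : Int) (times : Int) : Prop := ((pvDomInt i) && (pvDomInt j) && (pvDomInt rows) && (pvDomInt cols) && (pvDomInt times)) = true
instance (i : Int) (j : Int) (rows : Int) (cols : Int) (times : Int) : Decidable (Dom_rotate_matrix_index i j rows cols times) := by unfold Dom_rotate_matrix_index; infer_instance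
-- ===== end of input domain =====

-- ===== PORT A =====
-- one 90° clockwise step: (pi, pj, pr, pc) -> (pj, pr-1-pi, pc, pr)
def pvRotate90 (s : Int × Int × Int × Int) : Int × Int × Int × Int :=
  (s.2.1, s.2.2.1 - 1 - s.1, s.2.2.2, s.2.2.1)

def rotate_matrix_index (i : Int) (j : Int) (rows : Int) (cols : Int) (times : Int) : Int × Int :=
  let r := PySem.Int.mod times 4
  let st := (PySem.List.pyRange 0 r 1).foldl (fun s _ => pvRotate90 s) (i, j, rows, cols)
  (st.1, st.2.1)

-- ===== PORT B =====
def rotate_matrix_index_alt (i : Int) (j : Int) (rows : Int) (cols : Int) (times : Int) : Int × Int :=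
  let r := PySem.Int.mod times 4
  if r = 0 then (i, j)
  else if r = 1 then (j, rows - 1 - i)
  else if r = 2 then (rows - 1 - i, cols - 1 - j)
  else (cols - 1 - j, i)

-- ===== PRECONDITION & SPEC =====
def Spec_rotate_matrix_index (i : Int) (j : Int) (rows : Int) (cols : Int) (times : Int) (out : Int × Int) : Prop := out = rotate_matrix_index_alt i j rows cols times
instance (i : Int) (j : Int) (rows : Int) (cols : Int) (times : Int) (out : Int × Int) : Decidable (Spec_rotate_matrix_index i j rows cols times out) := by unfold Spec_rotate_matrix_index; infer_instance

-- ===== CLAIM (what is proved, stated in full; the proofs are below) =====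
def Claim_equal_rotate_matrix_index : Prop := ∀ (i : Int) (j : Int) (rows : Int) (cols : Int) (times : Int), Dom_rotate_matrix_index i j rows cols times → Spec_rotate_matrix_index i j rows cols times (rotate_matrix_index i j rows cols times)

-- B replaces the iteration by a 4-case closed form on times % 4 (objective: simpler).
-- ===== LEMMAS AND PROOFS =====

-- ===== VERDICT (by name: the statement is the Claim_ definition above) =====
theorem rotate_matrix_index_spec : Claim_equal_rotate_matrix_index := by
  intro i j rows cols times _
  unfold Spec_rotate_matrix_index rotate_matrix_index rotate_matrix_index_alt
  have h0 : (0:Int) < 4 := by norm_num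
  have hlo := PySem.Int.mod_nonneg times h0
  have hhi := PySem.Int.mod_lt times h0
  have : PySem.Int.mod times 4 = 0 ∨ PySem.Int.mod times 4 = 1 ∨
      PySem.Int.mod times 4 = 2 ∨ PySem.Int.mod times 4 = 3 := by omega
  have e0 : PySem.List.pyRange 0 0 1 = [] := by decide
  have e1 : PySem.List.pyRange 0 1 1 = [0] := by decide
  have e2 : PySem.List.pyRange 0 2 1 = [0, 1] := by decide
  have e3 : PySem.List.pyRange 0 3 1 = [0, 1, 2] := by decide
  rcases this with h | h | h | h <;>
    rw [h] <;>
    norm_num [e0, e1, e2, e3, pvRotate90, Prod.ext_iff, List.foldl] <;> omega
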